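-- pv_equiv track=rewrite | github.com/khudeeva/python-tests | utils/math_utils.py | find_unique_roles
-- ===== SOURCE A (Python) =====
-- def find_unique_roles(users):
--     seen_once = set()
--     duplicates = set()
--
--     for key, data in users.items():
--         role = data["role"]
--         if data["role"] in seen_once:
--             duplicates.add(role)
--         else:
--             seen_once.add(role)
--     return sorted(seen_once - duplicates)
-- ===== SOURCE B (Python) =====
-- def find_unique_roles(users):
--     roles = sorted(data["role"] for data in users.values())
--     result = []
--     for i, role in enumerate(roles):
--         if (i == 0 or roles[i - 1] != role) and (i == len(roles) - 1 or roles[i + 1] != role):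
--             result.append(role)
--     return result
-- ===== Notes on version B (the rewrite author's own statement) =====
-- stated objective: alternative
-- what changed: Drops A's hash-set bookkeeping (seen_once/duplicates + set difference + final sort) in favour of sorting the role list first and then scanning it once, keeping each element whose sorted neighbours both differ from it.
import Mathlib
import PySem

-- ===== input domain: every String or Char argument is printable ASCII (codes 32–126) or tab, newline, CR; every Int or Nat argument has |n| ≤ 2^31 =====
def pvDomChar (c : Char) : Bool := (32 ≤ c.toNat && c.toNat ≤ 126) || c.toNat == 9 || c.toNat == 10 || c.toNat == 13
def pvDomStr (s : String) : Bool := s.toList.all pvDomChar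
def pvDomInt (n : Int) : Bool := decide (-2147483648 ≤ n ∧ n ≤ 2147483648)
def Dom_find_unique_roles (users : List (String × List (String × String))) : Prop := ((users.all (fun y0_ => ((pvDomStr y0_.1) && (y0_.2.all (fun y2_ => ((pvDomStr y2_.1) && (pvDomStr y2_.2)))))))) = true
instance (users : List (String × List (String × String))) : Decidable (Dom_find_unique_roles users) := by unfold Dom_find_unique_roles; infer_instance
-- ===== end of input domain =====

-- B replaces A's two-set bookkeeping + set difference + final sort by sorting the role list
-- first and keeping each element whose sorted neighbours both differ from it (alternative).

-- data["role"]; total getD form, exact under Pre_ (which requires the "role" key to be present)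
def pvRole (kd : String × List (String × String)) : String :=
  (PySem.Dict.mk kd.2).getD "role" ""

-- ===== PORT A =====
def find_unique_roles (users : List (String × List (String × String))) : List String :=
  let st := users.foldl
    (fun (p : PySem.Set String × PySem.Set String) kd =>
      let role := pvRole kd
      if PySem.Set.contains p.1 role then (p.1, PySem.Set.add p.2 role)
      else (PySem.Set.add p.1 role, p.2))
    (PySem.Set.empty, PySem.Set.empty)
  PySem.List.sorted (PySem.Set.diff st.1 st.2) (fun x => x) false

-- ===== PORT B =====
def find_unique_roles_alt (users : List (String × List (String × String))) : List String :=
  let roles := PySem.List.sorted (users.map pvRole) (fun x => x) false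
  (PySem.List.enumerate roles).foldl
    (fun result (ir : Int × String) =>
      if ((ir.1 == 0) || (PySem.List.pyGet? roles (ir.1 - 1) != some ir.2))
         && ((ir.1 == (roles.length : Int) - 1) || (PySem.List.pyGet? roles (ir.1 + 1) != some ir.2))
      then result ++ [ir.2] else result) []

-- ===== PRECONDITION & SPEC =====
-- Pre_ excludes exactly the inputs where some user record lacks the "role" key: there A raises KeyError (and so does B).
def Pre_find_unique_roles (users : List (String × List (String × String))) : Prop :=
  (users.all (fun kd => (PySem.Dict.mk kd.2).contains "role")) = true
instance (users : List (String × List (String × String))) : Decidable (Pre_find_unique_roles users) := by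
  unfold Pre_find_unique_roles; infer_instance
def pvWitness_find_unique_roles : (List (String × List (String × String))) :=
  [("u1", [("role", "admin")]), ("u2", [("role", "dev")])]
def Spec_find_unique_roles (users : List (String × List (String × String))) (out : List String) : Prop := out = find_unique_roles_alt users
instance (users : List (String × List (String × String))) (out : List String) : Decidable (Spec_find_unique_roles users out) := by unfold Spec_find_unique_roles; infer_instance

-- ===== CLAIM (what is proved, stated in full; the proofs are below) =====
def Claim_equal_find_unique_roles : Prop := ∀ (users : List (String × List (String × String))), Dom_find_unique_roles users → Pre_find_unique_roles users → Spec_find_unique_roles users (find_unique_roles users)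

-- ===== LEMMAS AND PROOFS =====

-- ---- A side: the two-set fold ----
def pvStepA (p : PySem.Set String × PySem.Set String) (r : String) :
    PySem.Set String × PySem.Set String :=
  if PySem.Set.contains p.1 r then (p.1, PySem.Set.add p.2 r)
  else (PySem.Set.add p.1 r, p.2)

theorem pvStepA_mem {s d : PySem.Set String} {y : String} (hy : y ∈ s) :
    pvStepA (s, d) y = (s, PySem.Set.add d y) := by
  simp [pvStepA, hy]

theorem pvStepA_not_mem {s d : PySem.Set String} {y : String} (hy : y ∉ s) :
    pvStepA (s, d) y = (PySem.Set.add s y, d) := by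
  simp [pvStepA, hy]

theorem pvFold1 (rs : List String) (s d : PySem.Set String) :
    (rs.foldl pvStepA (s, d)).1 = PySem.Set.update s rs := by
  induction rs generalizing s d with
  | nil => simp [PySem.Set.update]
  | cons y t ih =>
      simp only [List.foldl_cons, PySem.Set.update_cons]
      by_cases hy : y ∈ s
      · rw [pvStepA_mem hy, ih, PySem.Set.add_of_mem hy]
      · rw [pvStepA_not_mem hy, ih]

theorem pvFold2 (rs : List String) (s d : PySem.Set String) (x : String) :
    x ∈ (rs.foldl pvStepA (s, d)).2 ↔ x ∈ d ∨ (x ∈ s ∧ x ∈ rs) ∨ 2 ≤ rs.count x := by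
  induction rs generalizing s d with
  | nil => simp
  | cons y t ih =>
      simp only [List.foldl_cons]
      by_cases hy : y ∈ s
      · rw [pvStepA_mem hy, ih]
        by_cases hxy : x = y
        · subst hxy
          constructor
          · intro _
            exact Or.inr (Or.inl ⟨hy, List.mem_cons_self⟩)
          · intro _
            exact Or.inl ((PySem.Set.mem_add _ _ _).2 (Or.inr rfl))
        · simp only [PySem.Set.mem_add, List.mem_cons, hxy, or_false,
            List.count_cons_of_ne (Ne.symm hxy)]
          tauto
      · rw [pvStepA_not_mem hy, ih]
        by_cases hxy : x = y
        · subst hxy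
          constructor
          · rintro (h | ⟨-, h⟩ | h)
            · exact Or.inl h
            · have := List.count_pos_iff.2 h
              exact Or.inr (Or.inr (by rw [List.count_cons_self]; omega))
            · exact Or.inr (Or.inr (by rw [List.count_cons_self]; omega))
          · rintro (h | ⟨hs, -⟩ | h)
            · exact Or.inl h
            · exact absurd hs hy
            · rw [List.count_cons_self] at h
              have hx : x ∈ t := List.count_pos_iff.1 (by omega)
              exact Or.inr (Or.inl ⟨(PySem.Set.mem_add _ _ _).2 (Or.inr rfl), hx⟩)
        · simp only [PySem.Set.mem_add, List.mem_cons, hxy, or_false,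
            List.count_cons_of_ne (Ne.symm hxy)]
          tauto

-- membership in A's pre-sort list is "appears exactly once"
theorem pvMemDiff (rs : List String) (x : String) :
    x ∈ PySem.Set.diff (PySem.Set.update PySem.Set.empty rs)
        ((rs.foldl pvStepA (PySem.Set.empty, PySem.Set.empty)).2)
      ↔ rs.count x = 1 := by
  rw [PySem.Set.mem_diff, pvFold2, PySem.Set.update_empty, PySem.Set.mem_ofList]
  simp only [PySem.Set.empty, List.not_mem_nil, false_and, false_or]
  constructor
  · rintro ⟨hmem, hc⟩
    have h1 : 1 ≤ rs.count x := List.count_pos_iff.2 hmem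
    omega
  · intro hc
    exact ⟨List.count_pos_iff.1 (by omega), by omega⟩

-- ---- B side: the neighbour test over the sorted list ----
def pvP (s : List String) (ir : Int × String) : Bool :=
  ((ir.1 == 0) || (PySem.List.pyGet? s (ir.1 - 1) != some ir.2))
    && ((ir.1 == (s.length : Int) - 1) || (PySem.List.pyGet? s (ir.1 + 1) != some ir.2))

-- squeezing in a ≤-sorted list: equal endpoints force equal middles
theorem pvSqueeze {s : List String} (hs : s.Pairwise (· ≤ ·))
    {i k j : Nat} (hik : i ≤ k) (hkj : k ≤ j) (hj : j < s.length)
    (heq : s[i]'(by omega) = s[j]'(by omega)) : s[k]'(by omega) = s[i]'(by omega) := by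
  rw [List.pairwise_iff_getElem] at hs
  rcases Nat.eq_or_lt_of_le hik with h1 | h1
  · subst h1; rfl
  rcases Nat.eq_or_lt_of_le hkj with h2 | h2
  · subst h2; exact heq.symm
  exact le_antisymm (by rw [heq]; exact hs k j (by omega) hj h2) (hs i k (by omega) (by omega) h1)

theorem pvP_iff {s : List String} {k : Nat} (hk : k < s.length) :
    pvP s ((k : Int), s[k]) = true ↔
      ((k = 0 ∨ (∀ h : 0 < k, s[k-1]'(by omega) ≠ s[k])) ∧
       (k = s.length - 1 ∨ s[k+1]? ≠ some s[k])) := by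
  unfold pvP
  simp only [Bool.and_eq_true, Bool.or_eq_true, beq_iff_eq, bne_iff_ne, ne_eq]
  constructor
  · rintro ⟨h1, h2⟩
    constructor
    · rcases h1 with h1 | h1
      · left; exact_mod_cast h1
      · right; intro hpos heq
        apply h1
        have : (k : Int) - 1 = ((k - 1 : Nat) : Int) := by omega
        rw [this, PySem.List.pyGet?_natCast, List.getElem?_eq_getElem (by omega), heq]
    · rcases h2 with h2 | h2
      · left; omega
      · right; intro heq
        apply h2
        have : (k : Int) + 1 = ((k + 1 : Nat) : Int) := by omega
        rw [this, PySem.List.pyGet?_natCast, heq]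
  · rintro ⟨h1, h2⟩
    constructor
    · rcases h1 with h1 | h1
      · left; exact_mod_cast h1
      · by_cases hk0 : k = 0
        · left; exact_mod_cast hk0
        · right
          have : (k : Int) - 1 = ((k - 1 : Nat) : Int) := by omega
          rw [this, PySem.List.pyGet?_natCast, List.getElem?_eq_getElem (by omega)]
          intro hcontra
          exact h1 (by omega) (by injection hcontra)
    · rcases h2 with h2 | h2
      · left; omega
      · right
        have : (k : Int) + 1 = ((k + 1 : Nat) : Int) := by omega
        rw [this, PySem.List.pyGet?_natCast]
        exact h2

def pvB (s : List String) : List String :=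
  ((PySem.List.enumerate s).filter (pvP s)).map Prod.snd

-- membership in B's result is "appears exactly once", for a ≤-sorted list
theorem pvMemB {s : List String} (hs : s.Pairwise (· ≤ ·)) (x : String) :
    x ∈ pvB s ↔ s.count x = 1 := by
  unfold pvB
  rw [List.mem_map]
  constructor
  · rintro ⟨ir, hir, rfl⟩
    rw [List.mem_filter] at hir
    obtain ⟨hmem, hP⟩ := hir
    rw [PySem.List.mem_enumerate_iff] at hmem
    obtain ⟨k, hk, rfl⟩ := hmem
    simp only [zero_add] at hP ⊢
    rw [pvP_iff hk] at hP
    obtain ⟨h1, h2⟩ := hP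
    -- decompose s at position k
    have hsplit : s = s.take k ++ s[k] :: s.drop (k + 1) := by
      conv_lhs => rw [← List.take_append_drop k s]
      rw [List.getElem_cons_drop hk]
    have hceq := congrArg (fun l => List.count (s[k]'hk) l) hsplit
    simp only [List.count_append, List.count_cons_self] at hceq
    rw [hceq]
    have htake : (s.take k).count s[k] = 0 := by
      rw [List.count_eq_zero]
      intro hmem'
      obtain ⟨j, hj, hval⟩ := List.mem_iff_getElem.1 hmem'
      rw [List.getElem_take] at hval
      have hjk : j < k := by
        have := hj; simp [List.length_take] at this; omega
      have hmid := pvSqueeze hs (i := j) (k := k - 1) (j := k)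
        (by omega) (by omega) hk hval
      rcases h1 with h1 | h1
      · omega
      · exact h1 (by omega) (by rw [hmid, hval])
    have hdrop : (s.drop (k + 1)).count s[k] = 0 := by
      rw [List.count_eq_zero]
      intro hmem'
      obtain ⟨j, hj, hval⟩ := List.mem_iff_getElem.1 hmem'
      rw [List.getElem_drop] at hval
      have hjlen : k + 1 + j < s.length := by
        have := hj; simp [List.length_drop] at this; omega
      have hmid := pvSqueeze hs (i := k) (k := k + 1) (j := k + 1 + j)
        (by omega) (by omega) hjlen hval.symm
      rcases h2 with h2 | h2
      · omega
      · exact h2 (by rw [List.getElem?_eq_getElem (by omega), hmid])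
    omega
  · intro hc
    have hmem : x ∈ s := List.count_pos_iff.1 (by omega)
    obtain ⟨k, hk, rfl⟩ := List.mem_iff_getElem.1 hmem
    refine ⟨((k : Int), s[k]), ?_, rfl⟩
    rw [List.mem_filter]
    constructor
    · rw [PySem.List.mem_enumerate_iff]
      exact ⟨k, hk, by simp⟩
    · rw [pvP_iff hk]
      have hsplit : s = s.take k ++ s[k] :: s.drop (k + 1) := by
        conv_lhs => rw [← List.take_append_drop k s]
        rw [List.getElem_cons_drop hk]
      have hceq := congrArg (fun l => List.count (s[k]'hk) l) hsplit
      simp only [List.count_append, List.count_cons_self] at hceq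
      have hcnt : (s.take k).count s[k] + (1 + (s.drop (k + 1)).count s[k]) = 1 := by
        omega
      constructor
      · by_cases hk0 : k = 0
        · exact Or.inl hk0
        · right; intro hpos heq
          have : s[k-1] ∈ s.take k := by
            rw [List.mem_iff_getElem]
            exact ⟨k - 1, by simp [List.length_take]; omega, by rw [List.getElem_take]⟩
          rw [heq] at this
          have := List.count_pos_iff.2 this
          omega
      · by_cases hklast : k = s.length - 1
        · exact Or.inl hklast
        · right
          have hk1 : k + 1 < s.length := by omega
          rw [List.getElem?_eq_getElem hk1]
          intro hcontra
          have heq : s[k+1] = s[k] := by injection hcontra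
          have : s[k+1] ∈ s.drop (k + 1) := by
            rw [List.mem_iff_getElem]
            exact ⟨0, by simp [List.length_drop]; omega, by rw [List.getElem_drop]⟩
          rw [heq] at this
          have := List.count_pos_iff.2 this
          omega

-- B's result is strictly increasing, for a ≤-sorted list
theorem pvBPairwise {s : List String} (hs : s.Pairwise (· ≤ ·)) :
    (pvB s).Pairwise (· < ·) := by
  unfold pvB
  have hidx : ((PySem.List.enumerate s).filter (pvP s)).Pairwise
      (fun p q : Int × String => p.1 < q.1) :=
    (PySem.List.pairwise_lt_enumerate (xs := s) (s := 0)).filter _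
  have hval : ((PySem.List.enumerate s).filter (pvP s)).Pairwise
      (fun p q : Int × String => p.2 < q.2) := by
    refine List.Pairwise.imp_of_mem ?_ hidx
    intro p q hp hq hlt
    rw [List.mem_filter] at hp hq
    obtain ⟨hpmem, hpP⟩ := hp
    obtain ⟨hqmem, hqP⟩ := hq
    rw [PySem.List.mem_enumerate_iff] at hpmem hqmem
    obtain ⟨i, hi, rfl⟩ := hpmem
    obtain ⟨j, hj, rfl⟩ := hqmem
    simp only [zero_add] at hlt hpP hqP ⊢
    have hij : i < j := by exact_mod_cast hlt
    have hle : s[i] ≤ s[j] := by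
      rw [List.pairwise_iff_getElem] at hs
      exact hs i j hi hj hij
    rcases lt_or_eq_of_le hle with h | h
    · exact h
    · exfalso
      rw [pvP_iff hi] at hpP
      have hmid := pvSqueeze hs (i := i) (k := i + 1) (j := j) (by omega) (by omega) hj h
      rcases hpP.2 with h2 | h2
      · omega
      · exact h2 (by rw [List.getElem?_eq_getElem (by omega), hmid])
  exact List.Pairwise.map Prod.snd (fun a b h => h) hval

-- the B fold is pvB of the sorted list
theorem pvAltEq (users : List (String × List (String × String))) :
    find_unique_roles_alt users =
      pvB (PySem.List.sorted (users.map pvRole) (fun x => x) false) := by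
  show (PySem.List.enumerate (PySem.List.sorted (users.map pvRole) (fun x => x) false)).foldl
      (fun result ir =>
        if pvP (PySem.List.sorted (users.map pvRole) (fun x => x) false) ir
        then result ++ [Prod.snd ir] else result) [] = _
  rw [PySem.List.foldl_append_if]
  rfl

-- ===== VERDICT (by name: the statement is the Claim_ definition above) =====
theorem find_unique_roles_spec : Claim_equal_find_unique_roles := by
  intro users _ _
  unfold Spec_find_unique_roles
  rw [pvAltEq]
  unfold find_unique_roles
  have hA : users.foldl
      (fun (p : PySem.Set String × PySem.Set String) kd =>
        let role := pvRole kd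
        if PySem.Set.contains p.1 role then (p.1, PySem.Set.add p.2 role)
        else (PySem.Set.add p.1 role, p.2))
      (PySem.Set.empty, PySem.Set.empty)
      = (users.map pvRole).foldl pvStepA (PySem.Set.empty, PySem.Set.empty) := by
    rw [List.foldl_map]
    rfl
  simp only [hA]
  set rs := users.map pvRole with hrs
  set s := PySem.List.sorted rs (fun x => x) false with hsdef
  have hsort : s.Pairwise (· ≤ ·) := PySem.List.sorted_pairwise rs (fun x => x)
  have hperm : s.Perm rs := PySem.List.sorted_perm rs (fun x => x) false
  rw [pvFold1]
  have hBpw : (pvB s).Pairwise (· < ·) := pvBPairwise hsort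
  have hBnodup : (pvB s).Nodup := hBpw.imp (fun h => ne_of_lt h)
  have hDnodup : (PySem.Set.diff (PySem.Set.update PySem.Set.empty rs)
      ((rs.foldl pvStepA (PySem.Set.empty, PySem.Set.empty)).2)).Nodup := by
    rw [PySem.Set.update_empty]
    exact PySem.Set.nodup_diff _ _ (PySem.Set.nodup_ofList rs)
  have hpermBD : (pvB s).Perm (PySem.Set.diff (PySem.Set.update PySem.Set.empty rs)
      ((rs.foldl pvStepA (PySem.Set.empty, PySem.Set.empty)).2)) := by
    apply (List.perm_ext_iff_of_nodup hBnodup hDnodup).2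
    intro x
    rw [pvMemB hsort, pvMemDiff, hperm.count_eq]
  exact PySem.List.sorted_eq_of_perm_of_pairwise_lt _ _ _ hpermBD hBpw
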